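-- pv_equiv track=rewrite | github.com/git-hyunwoo/CodingInterview | 프로그래머스/0/120869. 외계어 사전/외계어 사전.py | solution
-- ===== SOURCE A (Python) =====
-- def solution(spell, dic):
--     answer = 2
--     for value in dic:
--         cnt = 0
--         for s in spell:
--             if s in value:
--                 cnt += 1
--         if cnt == len(spell):
--             answer = 1
--             break
--     return answer
-- ===== SOURCE B (Python) =====
-- def solution(spell, dic):
--     survivors = dic
--     for s in spell:
--         survivors = [w for w in survivors if s in w]
--     return 1 if survivors else 2
-- ===== Notes on version B (the rewrite author's own statement) =====
-- stated objective: faster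
-- what changed: Inverts the loop nesting: instead of counting spell-substring hits per dictionary word with an accumulator and break, B folds over spell, filtering the dictionary down to the words containing each spell string, and answers by whether any word survives.
import Mathlib
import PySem

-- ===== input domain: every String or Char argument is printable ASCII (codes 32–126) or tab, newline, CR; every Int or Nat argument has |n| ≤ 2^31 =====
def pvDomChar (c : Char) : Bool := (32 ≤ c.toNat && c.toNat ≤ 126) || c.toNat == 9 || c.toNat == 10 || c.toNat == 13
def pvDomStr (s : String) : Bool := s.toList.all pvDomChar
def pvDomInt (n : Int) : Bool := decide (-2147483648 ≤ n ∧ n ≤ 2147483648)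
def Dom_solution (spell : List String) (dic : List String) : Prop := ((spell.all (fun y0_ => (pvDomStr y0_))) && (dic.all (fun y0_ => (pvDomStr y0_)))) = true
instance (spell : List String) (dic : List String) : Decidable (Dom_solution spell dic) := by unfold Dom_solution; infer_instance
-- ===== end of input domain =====

-- B inverts the loop nesting (filter dic per spell string instead of counting per word); return value only.

-- ===== PORT A =====
-- outer 'for value in dic' with break: structural recursion; inner counting loop: foldl over spell
def solutionLoopA (spell : List String) : List String → Int
  | [] => 2
  | value :: rest =>
    let cnt := spell.foldl (fun cnt s => if PySem.Str.isIn s value then cnt + 1 else cnt) (0 : Int)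
    if cnt = (spell.length : Int) then 1 else solutionLoopA spell rest

def solution (spell : List String) (dic : List String) : Int :=
  solutionLoopA spell dic

-- ===== PORT B =====
def solution_alt (spell : List String) (dic : List String) : Int :=
  let survivors := spell.foldl (fun surv s => surv.filter (fun w => PySem.Str.isIn s w)) dic
  if survivors.isEmpty then 2 else 1

-- ===== PRECONDITION & SPEC =====
def Spec_solution (spell : List String) (dic : List String) (out : Int) : Prop := out = solution_alt spell dic
instance (spell : List String) (dic : List String) (out : Int) : Decidable (Spec_solution spell dic out) := by unfold Spec_solution; infer_instance

-- ===== CLAIM (what is proved, stated in full; the proofs are below) =====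
def Claim_equal_solution : Prop := ∀ (spell : List String) (dic : List String), Dom_solution spell dic → Spec_solution spell dic (solution spell dic)

-- ===== LEMMAS AND PROOFS =====

-- the common characterisation: 1 iff some word contains every spell string
def allIn (spell : List String) (w : String) : Bool := spell.all (fun s => PySem.Str.isIn s w)

lemma cnt_eq_countP (spell : List String) (value : String) :
    spell.foldl (fun cnt s => if PySem.Str.isIn s value then cnt + 1 else cnt) (0 : Int)
      = (spell.countP (fun s => PySem.Str.isIn s value) : Int) := by
  simpa using PySem.List.foldl_if_add_one (fun s => PySem.Str.isIn s value) spell (0 : Int)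

lemma cnt_cond_iff (spell : List String) (value : String) :
    (spell.foldl (fun cnt s => if PySem.Str.isIn s value then cnt + 1 else cnt) (0 : Int)
       = (spell.length : Int)) ↔ allIn spell value = true := by
  rw [cnt_eq_countP]
  constructor
  · intro h
    have hc : spell.countP (fun s => PySem.Str.isIn s value) = spell.length := by exact_mod_cast h
    have := List.countP_eq_length.mp hc
    simp [allIn, List.all_eq_true]
    intro s hs; exact this s hs
  · intro h
    have : spell.countP (fun s => PySem.Str.isIn s value) = spell.length :=
      List.countP_eq_length.mpr (by simpa [allIn, List.all_eq_true] using h)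
    exact_mod_cast this

lemma loopA_eq_any (spell : List String) (dic : List String) :
    solutionLoopA spell dic = if dic.any (allIn spell) then 1 else 2 := by
  induction dic with
  | nil => simp [solutionLoopA]
  | cons v rest ih =>
    simp only [solutionLoopA, List.any_cons]
    by_cases h : allIn spell v = true
    · rw [if_pos ((cnt_cond_iff spell v).mpr h)]; simp [h]
    · rw [if_neg (fun hc => h ((cnt_cond_iff spell v).mp hc))]
      simp [ih, Bool.eq_false_iff.mpr h]

lemma foldl_filter_eq (spell : List String) (dic : List String) :
    spell.foldl (fun surv s => surv.filter (fun w => PySem.Str.isIn s w)) dic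
      = dic.filter (allIn spell) := by
  induction spell generalizing dic with
  | nil =>
    simp only [List.foldl_nil]
    symm
    rw [List.filter_eq_self]
    intro w _; simp [allIn]
  | cons s rest ih =>
    simp only [List.foldl_cons, ih, List.filter_filter]
    congr 1
    funext w
    simp [allIn, Bool.and_comm]

-- ===== VERDICT (by name: the statement is the Claim_ definition above) =====
theorem solution_spec : Claim_equal_solution := by
  intro spell dic _
  show solution spell dic = solution_alt spell dic
  rw [solution, solution_alt, loopA_eq_any, foldl_filter_eq]
  by_cases h : dic.any (allIn spell)
  · rcases List.any_eq_true.mp h with ⟨w, hw, hall⟩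
    have : dic.filter (allIn spell) ≠ [] := by
      simp [List.filter_eq_nil_iff]; exact ⟨w, hw, hall⟩
    simp [h, List.isEmpty_iff, this]
  · have : dic.filter (allIn spell) = [] := by
      simp only [List.filter_eq_nil_iff]
      intro w hw hall
      exact h (List.any_eq_true.mpr ⟨w, hw, hall⟩)
    simp [h, this]
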